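-- pv_equiv track=rewrite | github.com/7KASPAR7/University-Homeworks | hw4/task1/smile_logic.py | check
-- ===== SOURCE A (Python) =====
-- def check(string):
--     LST = ['(', ')', '{', '}', '[', ']']
--     k = True
--     for i in LST:
--         if i in string:
--             k = False
--             break
--     return k
-- ===== SOURCE B (Python) =====
-- def check(string):
--     brackets = {'(', ')', '{', '}', '[', ']'}
--     return all(c not in brackets for c in string)
-- ===== Notes on version B (the rewrite author's own statement) =====
-- stated objective: idiomatic
-- what changed: Instead of scanning the whole string once per bracket with substring searches and a break flag, B makes a single pass over the string's characters testing each against a constant set of brackets.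
import Mathlib
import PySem

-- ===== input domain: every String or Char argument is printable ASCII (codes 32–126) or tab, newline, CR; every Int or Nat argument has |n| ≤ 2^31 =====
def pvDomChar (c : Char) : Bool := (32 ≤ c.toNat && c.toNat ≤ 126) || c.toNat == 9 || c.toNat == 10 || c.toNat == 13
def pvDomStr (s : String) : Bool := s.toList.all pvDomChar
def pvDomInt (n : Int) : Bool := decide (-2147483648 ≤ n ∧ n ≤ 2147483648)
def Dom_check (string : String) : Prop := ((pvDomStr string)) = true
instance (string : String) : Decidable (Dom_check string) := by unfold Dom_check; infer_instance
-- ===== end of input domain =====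

-- B replaces A's per-bracket substring scans (with a break flag) by one pass over the
-- string's characters against a constant bracket set; return value only, no side effects.

-- ===== PORT A =====
-- the loop 'for i in LST: if i in string: k = False; break' with accumulator k
def checkLoop (string : String) : List String → Bool
  | [] => true
  | i :: rest => if PySem.Str.isIn i string then false else checkLoop string rest

def check (string : String) : Bool :=
  checkLoop string ["(", ")", "{", "}", "[", "]"]

-- ===== PORT B =====
def bracketSet : PySem.Set Char := PySem.Set.ofList ['(', ')', '{', '}', '[', ']']

def check_alt (string : String) : Bool :=
  string.toList.all (fun c => !(decide (c ∈ bracketSet)))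

-- ===== PRECONDITION & SPEC =====
def Spec_check (string : String) (out : Bool) : Prop := out = check_alt string
instance (string : String) (out : Bool) : Decidable (Spec_check string out) := by unfold Spec_check; infer_instance

-- ===== CLAIM (what is proved, stated in full; the proofs are below) =====
def Claim_equal_check : Prop := ∀ (string : String), Dom_check string → Spec_check string (check string)

-- ===== LEMMAS AND PROOFS =====

-- single-character substring containment is character membership
theorem isIn_singleton_mem (b : String) (c : Char) (s : String) (hb : b.toList = [c]) :
    PySem.Str.isIn b s = s.toList.contains c := by
  rcases h : s.toList.contains c with _ | _
  · rw [PySem.Str.isIn_eq]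
    rw [hb]
    rw [PySem.Chars.isIn_eq_false_iff]
    intro hinf
    have : c ∈ s.toList := hinf.subset (by simp)
    simp [List.contains_eq_mem] at h
    exact h this
  · rw [PySem.Str.isIn_eq]
    rw [hb]
    have hc : c ∈ s.toList := by simpa [List.contains_eq_mem] using h
    rw [(PySem.Chars.isIn_iff_infix _ _).mpr]
    obtain ⟨l1, l2, hsplit⟩ := List.mem_iff_append.mp hc
    exact ⟨l1, l2, by simp [hsplit]⟩

-- ===== VERDICT (by name: the statement is the Claim_ definition above) =====
theorem check_spec : Claim_equal_check := by
  intro s _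
  show check s = check_alt s
  have h : ∀ c, c ∈ (['(', ')', '{', '}', '[', ']'] : List Char) ↔ c ∈ bracketSet := by
    intro c; simp [bracketSet, PySem.Set.mem_ofList]
  unfold check check_alt
  simp only [checkLoop]
  rw [isIn_singleton_mem _ '(' s (by decide), isIn_singleton_mem _ ')' s (by decide),
    isIn_singleton_mem _ '{' s (by decide), isIn_singleton_mem _ '}' s (by decide),
    isIn_singleton_mem _ '[' s (by decide), isIn_singleton_mem _ ']' s (by decide)]
  rcases hall : s.toList.all (fun c => !(decide (c ∈ bracketSet))) with _ | _
  · simp only [List.all_eq_false] at hall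
    obtain ⟨c, hc, hnc⟩ := hall
    have hmem : c ∈ bracketSet := by simpa using hnc
    have : c ∈ (['(', ')', '{', '}', '[', ']'] : List Char) := (h c).mpr hmem
    have hcont : s.toList.contains c = true := by simpa [List.contains_eq_mem] using hc
    fin_cases this <;> simp_all
  · simp only [List.all_eq_true] at hall
    have hn : ∀ c ∈ (['(', ')', '{', '}', '[', ']'] : List Char), c ∉ s.toList := by
      intro c hc hcm
      have := hall c hcm
      simp only [Bool.not_eq_eq_eq_not, Bool.not_true, decide_eq_false_iff_not] at this
      exact this ((h c).mp hc)
    simp [List.contains_eq_mem, hn '(' (by simp), hn ')' (by simp), hn '{' (by simp),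
      hn '}' (by simp), hn '[' (by simp), hn ']' (by simp)]
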